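/- GENERATED by mk_final_copies.py from the proof of the farm's unit `decode_all.4` (farm:decode_all.4.1: Proof.lean) as the
   re-elaboration sweep compiled it — do not edit. -/
import Asan.CheckWalk
import Vorbis.Spec.Units.decode_all_4

/- SEGMENT 4 OF decode_all (after the call of stb_vorbis_get_frame_float, 1035DAH … the `jmp` back to the loop head at 103607H,
   14 instructions), in the farm's format: from `AtGot k st n` either (`n = 0`, the `je` at 1035DFH) to the loop's exit `AtDone st`
   — nothing was written — or over `frames += n`, the call of copy_frame (its precondition from `AtGot.out` = `Top.FrameOut`),
   `stored = rax`, `k + 1` back to the loop head: `AtLoop (k + 1) st'`. The decode-time invariant after copy_frame's stores into the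
   output buffer: `DecodeInv.cfg` (no block CONFIG reads is OUT) + `da_carry_reads`. The walk starts at `v` in the middle of the
   function; `u` is the state at the function's entry. -/
open X86 X86.User Asan Vorbis Vorbis.Spec

set_option maxRecDepth 4000
set_option maxHeartbeats 4000000

namespace Vorbis.Spec.decode_all_4

/-- **The caller's footprint through a callee's**: every window of the callee lies inside a window of the caller. -/
theorem seg4_through_callee {ws ws' : List Span} {m0 m1 m2 : Mem} (h : Mem.SameExcept ws m0 m1)
    (hs : Mem.SameExcept ws' m1 m2) (hsub : ∀ w ∈ ws', InSpans ws w.lo (w.hi - w.lo)) : Mem.SameExcept ws m0 m2 := by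
  apply h.step_same hs
  intro w hw a h1 h2
  obtain ⟨w', hw', k1, k2⟩ := hsub w hw
  exact ⟨w', hw', by omega, by omega⟩

/-- **Where `*f` is**, as one arithmetic fact: in the data space, off the stack region, inside the arena's buffer. -/
theorem seg4_obj_where {others : List Obj} {frames : List (Nat × FrameLayout)} {len : Nat} {A : Arena}
    {stored room : Int} {ysz : Nat → Nat} {m : Mem} {f : Nat}
    (hdi : DecodeInv others frames len A stored room ysz m f) :
    0x400000 ≤ f ∧ f + 1808 ≤ 0xC00000 ∧ (f + 1808 ≤ 0x700000 ∨ 0x800000 ≤ f) ∧ A.B ≤ f ∧ f + 1808 ≤ A.B + A.L := by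
  have hoff := hdi.objOff
  have hr := hdi.fb.vorbis.bits.OBR
  have hrange := hdi.arena.block_range (p := f) (n := Off.sizeof.stb_vorbis) hdi.obj
  have h2 := hdi.arena.AR2
  have hl := le_r8 Off.sizeof.stb_vorbis
  simp only [voff] at hoff hr hrange hl
  omega

/-- The signed 64-bit value of a small number (`stored`, `room`: C `long`s). -/
theorem seg4_s64 (n : Nat) (h : n < 2 ^ 63) : s64 (UInt64.ofNat n) = (n : Int) := by
  have hp : (Word.part .w64 (UInt64.ofNat n)).toNat = n := by
    show (BitVec.setWidth 64 (UInt64.ofNat n).toBitVec).toNat = _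
    rw [BitVec.toNat_setWidth]
    show (UInt64.ofNat n).toNat % 2 ^ 64 = n
    rw [UInt64.toNat_ofNat']
    omega
  have hc := BitVec.toInt_eq_toNat_cond (Word.part .w64 (UInt64.ofNat n))
  have hb : (2 : Nat) ^ Width.w64.bits = 18446744073709551616 := rfl
  rw [hb] at hc
  unfold s64
  split at hc <;> omega

/-- The number in a register whose signed 64-bit value is known to lie in `[0, 2^63)` (copy_frame's result). -/
theorem seg4_s64_toNat (w : Word) (lo : Int) (h0 : 0 ≤ lo) (h1 : lo ≤ s64 w) :
    s64 w = (w.toNat : Int) := by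
  have hp : (Word.part .w64 w).toNat = w.toNat := by
    show (BitVec.setWidth 64 w.toBitVec).toNat = _
    rw [BitVec.toNat_setWidth]
    show w.toNat % 2 ^ 64 = w.toNat
    exact Nat.mod_eq_of_lt w.toNat_lt
  have hc := BitVec.toInt_eq_toNat_cond (Word.part .w64 w)
  have hb : (2 : Nat) ^ Width.w64.bits = 18446744073709551616 := rfl
  rw [hb] at hc
  unfold s64 at h1 ⊢
  split at hc <;> omega

/-- The signed value of a dword loaded into a 32-bit register (`mov r8d, [rbx-50H]`, `mov r9d, eax`): `sint32` of the number. -/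
theorem seg4_s32_load (x : Nat) (hx : x < 2 ^ 32) : s32 (Word.ofBV (BitVec.ofNat 32 x)) = sint32 x := by
  rw [s32_eq_argInt, argInt_def, Vorbis.toNat_ofBV32, BitVec.toNat_ofNat]
  have e : x % 2 ^ 32 % 2 ^ 32 = x := by omega
  rw [e]

/-- **The decode-time invariant over stores into the output buffer and the stack** (copy_frame's footprint in decode_all's loop, the
pushed return address, the spill of `stored`): `da_out_stores` for windows in `[400000H, 700000H)` OR in the stack region — an allocated block
other than OUT is disjoint from OUT (`BlkOK.disjoint`) and lies off the stack region (`DecodeInv.offStack`); no block that CONFIG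
reads is OUT by `DecodeInv.cfg` (`da_reads_ne_out`). No window meets the shadow; the counters stay `0 0`. -/
theorem seg4_out_stack_stores {others : List Obj} {frames : List (Nat × FrameLayout)} {len : Nat} {Ar : Arena}
    {ysz : Nat → Nat} {mem mem' : Mem} {f : Nat}
    (h : DecodeInv others frames len Ar 0 0 ysz mem f)
    {spans : List Span} (hs : Mem.SameExcept spans mem mem')
    (hw : ∀ s, s ∈ spans → (0x400000 ≤ s.lo ∧ s.hi ≤ 0x700000) ∨ (0x700000 ≤ s.lo ∧ s.hi ≤ 0x800000)) :
    DecodeInv others frames len Ar 0 0 ysz mem' f := by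
  have hok := h.ok
  -- no window meets the shadow region
  have hsh : Mem.EqOn 0xC00000 0xE00000 mem mem' := by
    intro a h1 h2
    apply hs a
    intro w hwm
    rcases hw w hwm with ⟨w1, w2⟩ | ⟨w1, w2⟩
    · right
      omega
    · right
      omega
  have hmiss := decode_all.da_reads_ne_out h h.cfg
  have hOUT : RunBlk Ar len blockOUT := decode_all.da_out_runBlk Ar len
  -- every allocated block other than OUT is kept
  have hkept : ∀ B, RunBlk Ar len B → B ≠ blockOUT → B.Kept mem mem' := by
    intro B hB hne
    have hd := hok.disjoint hB hOUT hne
    have hst := h.offStack B hB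
    apply Block.Kept.of_sameExcept hs _ (hok.no_wrap hB)
    intro w hwm
    simp only [vblock, blockOUT] at hd
    rcases hw w hwm with ⟨w1, w2⟩ | ⟨w1, w2⟩
    · omega
    · omega
  have hobjne : objBlock f ≠ blockOUT := by
    intro e
    have hr := h.arena.block_range (p := f) (n := Off.sizeof.stb_vorbis) h.obj
    have ho := h.hand.outside blockOUT (by unfold fixedBlocks; exact List.mem_cons_of_mem _ List.mem_cons_self)
    have e1 : f = 0x400000 := congrArg Block.base e
    simp only [blockOUT, voff] at hr ho
    have hl := le_r8 1808
    have h2 := h.arena.AR2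
    omega
  refine decode_all.da_carry_reads h hsh (hkept _ h.ob1 hobjne) ?_ ?_ ?_ (Int.le_refl 0) (Int.le_refl 0)
  · intro B hR
    exact hkept B (h.config.reads_blk hR) (hmiss B hR)
  · refine hkept _ (runBlk_global Ar len log2_4_global) ?_
    intro e
    have e1 := congrArg Block.base e
    simp only [blockOUT, Vorbis.Globals.log2_4] at e1
    omega
  · refine hkept _ (runBlk_global Ar len range_list_global) ?_
    intro e
    have e1 := congrArg Block.base e
    simp only [blockOUT, Vorbis.Globals.range_list] at e1
    omega

/-- **copy_frame's precondition in decode_all's loop** (the `example` of Vorbis/Spec/TopCheck.lean as a lemma, with the invariant and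
`Top.FrameOut` in the memory `m` BEFORE the return address was pushed: `hmem` says the pointers `outputs[c]` of `*f` read the same in
the state `s` at the callee's entry): `dst = out + 32`, `room = (cap − 32) / 4`, `chan = *(&chan) = f + 1000`, `channels = *(&ch)`,
`n = r > 0`. -/
theorem seg4_copy_pre {len : Nat} {A : Arena} {others : List Obj} {frames : List (Nat × FrameLayout)} {f : Nat}
    {stored room : Int} {ysz : Nat → Nat} (m : Mem) (s : State)
    (hsh : ShadowPre others frames s) (h : DecodeInv others frames len A stored room ysz m f)
    (hB : A.B = 0x800000) (hfix : Top.FixedLive len others frames) {pc po : Nat} {r : Int}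
    (hout : Top.FrameOut m f pc po r) (hr : 0 < r)
    (hmem : ∀ a, f ≤ a → a + 8 ≤ f + 1808 → s.mem.ptr a = m.ptr a)
    (hrdi : (s.reg .rdi).toNat = 0x400020) (hrsi0 : 0 ≤ s64 (s.reg .rsi)) (hrsi : s64 (s.reg .rsi) ≤ s64 (s.reg .rdx))
    (hrdx : s64 (s.reg .rdx) = 786424) (hrcx : (s.reg .rcx).toNat = f + 1000)
    (hr8 : s32 (s.reg .r8) = stb_vorbis.channels m f) (hr9 : s32 (s.reg .r9) = r) :
    (copy_frame.spec others frames).pre s := by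
  have hcfg := Real.VorbisOK.config h.fb.vorbis
  have hC16 := hcfg.header.HD1.2
  have hA : ArenaOK A others m f := h.fb.ado.ok
  have hobj : A.Block f Off.sizeof.stb_vorbis := h.obj
  have hrange := hA.block_range hobj
  have hob : Top.DBlk len A (objBlock f) := h.fb.vorbis.bits.OB1
  refine ⟨hsh, hrsi0, hrsi, ?_, ?_⟩
  · rw [hrdi, hrdx]
    have hO : listBlk (fixedBlocks len) blockOUT := by
      simp only [listBlk, fixedBlocks, List.mem_cons, true_or, or_true]
    refine LiveBytes.of_block (hfix.blk _ hO) ?_ ?_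
    · simp only [blockOUT]
      omega
    · simp only [blockOUT]
      omega
  · intro c hc
    rw [hr8] at hc
    refine ⟨?_, ?_, ?_⟩
    · rw [hrcx]
      refine LiveBytes.of_block (h.fb.env.live _ hob) ?_ ?_
      · simp only [objBlock]
        omega
      · simp only [objBlock, Off.sizeof.stb_vorbis]
        omega
    · right
      rw [hrdi, hrdx, hrcx]
      omega
    · intro hn
      rw [hr9] at hn ⊢
      rw [hrcx, hmem (f + 1000 + 8 * c) (by omega) (by omega)]
      have e : m.ptr (f + 1000 + 8 * c) = stb_vorbis.outputs m f c := by
        simp only [vacc, voff]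
      rw [e]
      exact TopCheck.outputs_live h hout hr c hc

end Vorbis.Spec.decode_all_4

/-- **Segment 4**: `n = 0` leaves the loop (`AtDone`: nothing was written); else `frames += n`, the call of copy_frame — its
precondition `seg4_copy_pre` from `AtGot.out`, the shadow layer over the pushed return address — then `stored = rax`, `k + 1`,
back to the loop head: `AtLoop (k + 1) st'` with `st' = rax`, the invariant by `seg4_out_stack_stores`. -/
theorem Vorbis.Spec.Worked.decode_all_4_ok : Vorbis.Spec.decode_all_4.Statement := by
  intro Lay hLay μ hμ u₀ hcode h_cf others frames len u ret others' A ysz f k st n v hat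
  obtain ⟨j_rip, hbody, c_r12, hklt, c_rax, hn31, hout⟩ := hat
  obtain ⟨hfrm, c_rbx, c_rbp, c_r14, c_r13, k_sh, k_room, k_st, hstle, harena, hdi⟩ := hbody
  have he := hfrm.entry
  have he0 := he
  have hpre0 := hfrm.pre
  have hpre := hpre0
  v_entry he
  obtain ⟨hsh, hrdi, hrsi, hlen, hrdx, hrcx, hr8, hr9, hfix, hfree, hconsts⟩ := hpre
  obtain ⟨_, _, c_rsp, k_r15, k_r14, k_r13, k_r12, k_rbp, k_rbx, k_ret, k_out, hsame, j_code, j_inv, hinv, hfixed, hoffT⟩ := hfrm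
  obtain ⟨hAB, hAL⟩ := harena
  have hcf := h_cf others' (decode_all.ownFrames u frames)
  clear h_cf
  have hwf := Vorbis.Spec.decode_all_4.seg4_obj_where hdi
  rw [hAB, hAL] at hwf
  have e_st : s64 (UInt64.ofNat st) = (st : Int) := Vorbis.Spec.decode_all_4.seg4_s64 st (by omega)
  have e_room : s64 (786424 : Word) = 786424 := Vorbis.Spec.decode_all_4.seg4_s64 786424 (by omega)
  have e_rt : Int.toNat 786424 = 786424 := rfl
  have w_rip := j_rip
  have w_eq := Vorbis.conv_code_eqOn j_code
  have hdf : v.flags .df = false := (show X86.User.abiInv _ from j_inv).1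
  have hmx : v.mxcsr &&& 0x1F80 = 0x1F80 := (show X86.User.abiInv _ from j_inv).2
  have w_kept : RegsKept [.rsp] v v := RegsKept.refl _ _
  u_walk hcode [hμ.vendor, cnt32_part n] until [Vorbis.L.decode_all.loop1, Vorbis.L.decode_all.at_103640] span [Vorbis.L.textLo, Vorbis.L.textHi] side (v_side)
  case call_inv =>
    v_inv
  case pre_1035fa =>
    -- the precondition of copy_frame: one store since `v`, the return address at `R − 240`
    have hn0 : n ≠ 0 := by
      intro h0
      apply hbr_1035df
      rw [h0]
    obtain ⟨hch, hchan, _⟩ := hout hn0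
    have e_rsp : (s_1035fa.reg .rsp).toNat + 8 = (u.reg .rsp).toNat - 232 := by
      rw [w_rsp]
      u_omega
    have hinv' : ShadowInv others' (decode_all.ownFrames u frames) ((u.reg .rsp).toNat - 232) s_1035fa.mem := by
      rw [w_mem]
      exact ShadowInv.writeLE hinv _ _ _ (by u_omega) (by u_omega)
    -- the two objects that stb_vorbis_get_frame_float has stored: `ch` at `R − 136`, `chan` at `R − 120`
    have e1 : (u.reg .rsp - 136).toNat = (u.reg .rsp).toNat - 136 := by u_omega
    have e2 : (u.reg .rsp - 120).toNat = (u.reg .rsp).toNat - 120 := by u_omega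
    have a1 : addr ((u.reg .rsp).toNat - 136) = u.reg .rsp - 136 := by
      rw [← e1]
      exact UInt64.ofNat_toNat
    have a2 : addr ((u.reg .rsp).toNat - 120) = u.reg .rsp - 120 := by
      rw [← e2]
      exact UInt64.ofNat_toNat
    have hchan' : v.mem.readLE (addr ((u.reg .rsp).toNat - 120)) 8 = f + 1000 := hchan (by omega)
    rw [a2] at hchan'
    have hch' : sint32 (v.mem.readLE (addr ((u.reg .rsp).toNat - 136)) 4) = stb_vorbis.channels v.mem f := hch (by omega)
    rw [a1] at hch'
    have hlt4 : v.mem.readLE (u.reg .rsp - 136) 4 < 2 ^ 32 := Mem.readLE_lt' v.mem _ 4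
    refine Vorbis.Spec.decode_all_4.seg4_copy_pre v.mem s_1035fa ⟨?_, hoffT⟩ hdi hAB hfixed (hout hn0) (by omega) ?_ ?_ ?_ ?_ ?_ ?_ ?_ ?_
    · rw [e_rsp]
      exact hinv'
    · intro a ha1 ha2
      rw [w_mem]
      exact Mem.ptr_writeLE v.mem _ 8 _ a (by u_omega) (by omega) (by u_omega)
    · rw [w_rdi]
      rfl
    · rw [w_rsi, e_st]
      omega
    · rw [w_rsi, w_rdx, e_st, e_room]
      omega
    · rw [w_rdx]
      exact e_room
    · rw [w_rcx, hchan', UInt64.toNat_ofNat']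
      omega
    · rw [w_r8, Vorbis.Spec.decode_all_4.seg4_s32_load _ hlt4]
      exact hch'
    · rw [w_r9, Vorbis.Spec.decode_all_4.seg4_s32_load n (by omega)]
      have hc := sint32_cases n
      omega
  · -- 0x1035df `je` taken: `n = 0`, the loop's exit; nothing was written
    refine ReachVia.done (Or.inr ?_)
    have hfrm' : decode_all.DFrame others frames len u₀ u ret others' s_1035df := by
      refine ⟨he0, hpre0, w_rsp, ?_, ?_, ?_, ?_, ?_, ?_, ?_, ?_, ?_, Vorbis.conv_code_in w_eq, ?_, ?_, hfixed, hoffT⟩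
      · rw [w_mem]
        exact k_r15
      · rw [w_mem]
        exact k_r14
      · rw [w_mem]
        exact k_r13
      · rw [w_mem]
        exact k_r12
      · rw [w_mem]
        exact k_rbp
      · rw [w_mem]
        exact k_rbx
      · rw [w_mem]
        exact k_ret
      · rw [w_mem]
        exact k_out
      · rw [w_mem]
        exact hsame
      · v_inv
      · rw [w_mem]
        exact hinv
    refine ⟨w_rip, hfrm', ?_, ?_, ?_, ?_, ?_, ?_, ?_, hstle, ⟨hAB, hAL⟩, ?_⟩
    · rw [w_kept .rbx rfl]
      exact c_rbx
    · rw [w_kept .rbp rfl]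
      exact c_rbp
    · rw [w_kept .r14 rfl]
      exact c_r14
    · rw [w_kept .r13 rfl]
      exact c_r13
    · rw [w_mem]
      exact k_sh
    · rw [w_mem]
      exact k_room
    · rw [w_mem]
      exact k_st
    · rw [w_mem]
      exact hdi
  · -- 0x1035ff, after copy_frame: `stored = rax`, `k + 1`, back to the loop head
    v_after_call w_rsp_1035fa w_mem_1035fa
    simp only [w_rdi_1035fa, w_rsi_1035fa, w_rdx_1035fa, e_st, e_room, e_rt, Int.toNat_natCast] at w_same
    obtain ⟨hun1, hlo1, hhi1⟩ := w_post
    rw [w_rsi_1035fa, e_st] at hlo1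
    rw [w_rdx_1035fa, e_room] at hhi1
    rw [w_mem_1035fa] at hun1
    obtain ⟨z, w_rax⟩ : ∃ z, s_1035far.reg .rax = z := ⟨_, rfl⟩
    rw [w_rax] at hlo1 hhi1
    have ez := Vorbis.Spec.decode_all_4.seg4_s64_toNat z st (by omega) hlo1
    rw [ez] at hlo1 hhi1
    have hz1 : st ≤ z.toNat := by omega
    have hz2 : z.toNat ≤ 786424 := by omega
    -- the registers of the loop, kept by the callee (callee-saved)
    have c_rbx1 : s_1035far.reg .rbx = u.reg .rsp - 56 := by
      rw [w_kept .rbx rfl]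
      exact c_rbx
    have c_rbp1 : s_1035far.reg .rbp = 4194336 := by
      rw [w_kept .rbp rfl]
      exact c_rbp
    have c_r141 : (s_1035far.reg .r14).toNat = f := by
      rw [w_kept .r14 rfl]
      exact c_r14
    have c_r131 : s_1035far.reg .r13 = UInt64.ofNat len := by
      rw [w_kept .r13 rfl]
      exact c_r13
    have c_r121 : s_1035far.reg .r12 = UInt64.ofNat k := by
      rw [w_kept .r12 rfl]
      exact c_r12
    -- the stack slots through the pushed return address and the callee's footprint
    have q15 : UInt64.ofNat (s_1035far.mem.readLE (u.reg .rsp - 8) 8) = u.reg .r15 := by u_frame k_r15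
    have q14 : UInt64.ofNat (s_1035far.mem.readLE (u.reg .rsp - 16) 8) = u.reg .r14 := by u_frame k_r14
    have q13 : UInt64.ofNat (s_1035far.mem.readLE (u.reg .rsp - 24) 8) = u.reg .r13 := by u_frame k_r13
    have q12 : UInt64.ofNat (s_1035far.mem.readLE (u.reg .rsp - 32) 8) = u.reg .r12 := by u_frame k_r12
    have qbp : UInt64.ofNat (s_1035far.mem.readLE (u.reg .rsp - 40) 8) = u.reg .rbp := by u_frame k_rbp
    have qbx : UInt64.ofNat (s_1035far.mem.readLE (u.reg .rsp - 48) 8) = u.reg .rbx := by u_frame k_rbx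
    have q0 : UInt64.ofNat (s_1035far.mem.readLE (u.reg .rsp) 8) = ret := by u_frame k_ret
    have qout : s_1035far.mem.readLE (u.reg .rsp - 216) 8 = 4194304 := by u_frame k_out
    have qsh : UInt64.ofNat (s_1035far.mem.readLE (u.reg .rsp - 192) 8) = (u.reg .rsp - 184) >>> 3 := by u_frame k_sh
    have qroom : s_1035far.mem.readLE (u.reg .rsp - 224) 8 = 786424 := by u_frame k_room
    -- the footprint since the function's entry, and since `v` (for the invariant)
    have hpush : Mem.SameExcept _ u.mem (v.mem.writeLE (u.reg .rsp - 240) 8 (UInt64.toNat (L.decode_all.cut3 + 37))) :=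
      Mem.SameExcept.step_writeLE' (u.reg .rsp - 240) 8 _ hsame (by u_omega) (by u_same_side)
    have hsame1 := Vorbis.Spec.decode_all_4.seg4_through_callee hpush w_same (by
      simp only [List.forall_mem_cons, List.not_mem_nil, false_imp_iff, implies_true, and_true, X86.User.inSpans_cons,
        X86.User.inSpans_nil, or_false]
      repeat' apply And.intro
      all_goals u_omega)
    have hv0 : Mem.SameExcept [⟨0x700000, 0x800000⟩, ⟨0x400000, 0x700000⟩] v.mem v.mem := Mem.SameExcept.refl _ _
    have hv1 : Mem.SameExcept _ v.mem (v.mem.writeLE (u.reg .rsp - 240) 8 (UInt64.toNat (L.decode_all.cut3 + 37))) :=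
      Mem.SameExcept.step_writeLE' (u.reg .rsp - 240) 8 _ hv0 (by u_omega) (by u_same_side)
    have hv2 := Vorbis.Spec.decode_all_4.seg4_through_callee hv1 w_same (by
      simp only [List.forall_mem_cons, List.not_mem_nil, false_imp_iff, implies_true, and_true, X86.User.inSpans_cons,
        X86.User.inSpans_nil, or_false]
      repeat' apply And.intro
      all_goals u_omega)
    -- the shadow layer after copy_frame
    have hinv1 : ShadowInv others' (decode_all.ownFrames u frames) ((u.reg .rsp).toNat - 232) s_1035far.mem := by
      refine ShadowInv.untouched ?_ hun1
      exact ShadowInv.writeLE hinv _ _ _ (by u_omega) (by u_omega)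
    clear w_same hun1
    have hdf1 := w_df
    have hmx1 := w_mx
    u_walk hcode [hμ.vendor, cnt32_succ k (by omega)] until [Vorbis.L.decode_all.loop1, Vorbis.L.decode_all.at_103640] span [Vorbis.L.textLo, Vorbis.L.textHi] side (v_side)
    -- 0x1035c5 = loop1: the assertion at the head, round `k + 1`, `st' = rax`
    have hfrm' : decode_all.DFrame others frames len u₀ u ret others' s_103607 := by
      refine ⟨he0, hpre0, w_rsp, ?_, ?_, ?_, ?_, ?_, ?_, ?_, ?_, ?_, Vorbis.conv_code_in w_eq, ?_, ?_, hfixed, hoffT⟩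
      · u_frame q15
      · u_frame q14
      · u_frame q13
      · u_frame q12
      · u_frame qbp
      · u_frame qbx
      · u_frame q0
      · u_frame qout
      · rw [w_mem]
        exact Mem.SameExcept.step_writeLE' (u.reg .rsp - 232) 8 _ hsame1 (by u_omega) (by u_same_side)
      · v_inv
      · rw [w_mem]
        exact ShadowInv.writeLE hinv1 _ _ _ (by u_omega) (by u_omega)
    -- the decode-time invariant: every store since `v` went to the stack or into OUT
    have hv3 : Mem.SameExcept [⟨0x700000, 0x800000⟩, ⟨0x400000, 0x700000⟩] v.mem s_103607.mem := by
      rw [w_mem]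
      exact Mem.SameExcept.step_writeLE' (u.reg .rsp - 232) 8 _ hv2 (by u_omega) (by u_same_side)
    have hdi' : DecodeInv others' (decode_all.ownFrames u frames) len A 0 0 ysz s_103607.mem f := by
      refine Vorbis.Spec.decode_all_4.seg4_out_stack_stores hdi hv3 ?_
      intro sp hsp
      simp only [List.mem_cons, List.not_mem_nil, or_false] at hsp
      rcases hsp with rfl | rfl
      · right
        exact ⟨Nat.le_refl _, Nat.le_refl _⟩
      · left
        exact ⟨Nat.le_refl _, Nat.le_refl _⟩
    refine ReachVia.done (Or.inl ⟨z.toNat, ?_⟩)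
    refine ⟨w_rip, ⟨hfrm', ?_, ?_, ?_, ?_, ?_, ?_, ?_, hz2, ⟨hAB, hAL⟩, hdi'⟩, w_r12, by omega⟩
    · rw [w_kept .rbx rfl]
      exact c_rbx
    · rw [w_kept .rbp rfl]
      exact c_rbp
    · rw [w_kept .r14 rfl]
      exact c_r14
    · rw [w_kept .r13 rfl]
      exact c_r13
    · u_frame qsh
    · u_frame qroom
    · rw [w_mem, Mem.readLE_writeLE_same _ _ 8 _ (by omega)]
      have hzlt := z.toNat_lt
      omega
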